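-- pv_equiv track=rewrite | github.com/Shardyne/CDMOproject | source/SMT/python_files/parsers/convert.py | compute_period_cap_excess
-- ===== SOURCE A (Python) =====
-- def compute_period_cap_excess(sol, T, P, W, cap=2):
--     """Total excess over 'cap' for appearances of team t in period p across weeks."""
--     cnt = [[0]*P for _ in range(T+1)]
--     for p in range(P):
--         for w in range(W):
--             h, a = sol[p][w]
--             cnt[h][p] += 1
--             cnt[a][p] += 1
--     excess = 0
--     for t in range(1, T+1):
--         for p in range(P):
--             if cnt[t][p] > cap:
--                 excess += (cnt[t][p] - cap)
--     return excess
-- ===== SOURCE B (Python) =====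
-- def compute_period_cap_excess(sol, T, P, W, cap=2):
--     """Total excess over 'cap' for appearances of team t in period p across weeks."""
--     counts = {}
--     excess = 0
--     for p in range(P):
--         for w in range(W):
--             for t in sol[p][w]:
--                 if 1 <= t <= T:
--                     c = counts.get((t, p), 0) + 1
--                     counts[(t, p)] = c
--                     if c > cap:
--                         excess += 1
--     return excess
-- ===== Notes on version B (the rewrite author's own statement) =====
-- stated objective: simpler
-- what changed: Replaces A's two-phase count-matrix algorithm (fill a dense (T+1)xP matrix, then rescan the whole TxP grid for excesses) by a single streaming pass that filters team ids to 1..T up front and increments the excess online each time an appearance pushes a (team, period) count past the cap; there is no second phase and no dense grid.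
-- outside the precondition, e.g. on compute_period_cap_excess([[(-1, 3), (-1, 3), (-1, 3)]], 3, 1, 3, 2): A returns 4, B returns 1; on compute_period_cap_excess([[]], 1, 1, 0, -1): A returns 1, B returns 0
import Mathlib
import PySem

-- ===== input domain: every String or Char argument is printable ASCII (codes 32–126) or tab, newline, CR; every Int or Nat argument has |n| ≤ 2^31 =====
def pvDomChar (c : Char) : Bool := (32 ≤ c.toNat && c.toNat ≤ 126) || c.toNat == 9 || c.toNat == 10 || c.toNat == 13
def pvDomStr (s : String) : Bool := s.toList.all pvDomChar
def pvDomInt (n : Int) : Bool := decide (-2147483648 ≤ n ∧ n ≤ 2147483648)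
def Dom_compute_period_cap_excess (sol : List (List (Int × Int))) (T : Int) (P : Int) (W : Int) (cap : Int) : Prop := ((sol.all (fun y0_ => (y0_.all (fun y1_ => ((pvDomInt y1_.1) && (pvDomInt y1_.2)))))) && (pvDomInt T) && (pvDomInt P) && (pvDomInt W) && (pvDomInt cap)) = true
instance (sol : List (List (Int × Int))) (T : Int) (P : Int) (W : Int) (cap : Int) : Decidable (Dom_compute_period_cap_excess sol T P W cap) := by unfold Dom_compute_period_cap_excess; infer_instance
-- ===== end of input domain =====

-- B replaces A's two-phase dense-matrix algorithm (count into a (T+1)×P matrix, then rescan the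
-- whole T×P grid) by a single streaming pass that filters team ids up front and bumps the excess
-- online whenever an appearance pushes a (team, period) count past the cap (objective: simpler).

-- ===== PORT A =====
-- cnt[k.1][k.2] += 1  (Python list assignment, Python index semantics; total form exact on Pre_)
def pvBump (cnt : List (List Int)) (k : Int × Int) : List (List Int) :=
  PySem.List.pySetD cnt k.1
    (PySem.List.pySetD (PySem.List.pyGetD cnt k.1 []) k.2
      (PySem.List.pyGetD (PySem.List.pyGetD cnt k.1 []) k.2 0 + 1))

-- cnt[t][p]  (total form, exact on Pre_)
def pvLook (cnt : List (List Int)) (t : Int) (p : Int) : Int :=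
  PySem.List.pyGetD (PySem.List.pyGetD cnt t []) p 0

def compute_period_cap_excess (sol : List (List (Int × Int))) (T : Int) (P : Int) (W : Int) (cap : Int) : Int :=
  let cnt0 : List (List Int) := (PySem.List.pyRange 0 (T + 1) 1).map (fun _ => List.replicate P.toNat (0 : Int))
  let cnt := (PySem.List.pyRange 0 P 1).foldl (fun cnt p =>
      (PySem.List.pyRange 0 W 1).foldl (fun cnt w =>
        let hw := PySem.List.pyGetD (PySem.List.pyGetD sol p []) w ((0 : Int), (0 : Int))
        pvBump (pvBump cnt (hw.1, p)) (hw.2, p)) cnt) cnt0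
  (PySem.List.pyRange 1 (T + 1) 1).foldl (fun excess t =>
    (PySem.List.pyRange 0 P 1).foldl (fun excess p =>
      if cap < pvLook cnt t p then excess + (pvLook cnt t p - cap) else excess) excess) 0

-- ===== PORT B =====
-- state is (counts, excess); 'for t in sol[p][w]' iterates the pair as the two-element list
def compute_period_cap_excess_alt (sol : List (List (Int × Int))) (T : Int) (P : Int) (W : Int) (cap : Int) : Int :=
  let st : PySem.Dict (Int × Int) Int × Int := (PySem.List.pyRange 0 P 1).foldl (fun st p =>
      (PySem.List.pyRange 0 W 1).foldl (fun st w =>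
        let hw := PySem.List.pyGetD (PySem.List.pyGetD sol p []) w ((0 : Int), (0 : Int))
        [hw.1, hw.2].foldl (fun (st : PySem.Dict (Int × Int) Int × Int) t =>
          if 1 ≤ t ∧ t ≤ T then
            let c := st.1.getD (t, p) 0 + 1
            (st.1.insert (t, p) c, if cap < c then st.2 + 1 else st.2)
          else st) st) st) (PySem.Dict.empty, 0)
  st.2

-- ===== PRECONDITION & SPEC =====
-- Pre_ excludes (a) team ids outside 0..T in the played part of sol — most raise IndexError in A,
-- and ids in [-(T+1),-1] are counted into a wrapped row by A's dense matrix, an accident of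
-- negative indexing on an out-of-domain team id; (b) negative cap when the grid is non-empty,
-- where A also charges (-cap) for every never-occupied grid cell, a reading of an out-of-domain
-- parameter that a streaming counter reads equally defensibly as 0; (c) sol shorter than P rows or
-- rows shorter than W in the played region (IndexError in both A and B).
def Pre_compute_period_cap_excess (sol : List (List (Int × Int))) (T : Int) (P : Int) (W : Int) (cap : Int) : Prop :=
  ((0 < T ∧ 0 < P) → 0 ≤ cap) ∧
  (0 < W → P ≤ (sol.length : Int)) ∧
  (∀ row ∈ sol.take P.toNat, (0 < W → W ≤ (row.length : Int)) ∧
     ∀ hw ∈ row.take W.toNat, 0 ≤ hw.1 ∧ hw.1 ≤ T ∧ 0 ≤ hw.2 ∧ hw.2 ≤ T)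
instance (sol : List (List (Int × Int))) (T : Int) (P : Int) (W : Int) (cap : Int) : Decidable (Pre_compute_period_cap_excess sol T P W cap) := by unfold Pre_compute_period_cap_excess; infer_instance

def pvWitness_compute_period_cap_excess : (List (List (Int × Int))) × Int × Int × Int × Int :=
  ([[(1, 2)]], 2, 1, 1, 2)

def Spec_compute_period_cap_excess (sol : List (List (Int × Int))) (T : Int) (P : Int) (W : Int) (cap : Int) (out : Int) : Prop := out = compute_period_cap_excess_alt sol T P W cap
instance (sol : List (List (Int × Int))) (T : Int) (P : Int) (W : Int) (cap : Int) (out : Int) : Decidable (Spec_compute_period_cap_excess sol T P W cap out) := by unfold Spec_compute_period_cap_excess; infer_instance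

-- ===== CLAIM (what is proved, stated in full; the proofs are below) =====
def Claim_equal_compute_period_cap_excess : Prop := ∀ (sol : List (List (Int × Int))) (T : Int) (P : Int) (W : Int) (cap : Int), Dom_compute_period_cap_excess sol T P W cap → Pre_compute_period_cap_excess sol T P W cap → Spec_compute_period_cap_excess sol T P W cap (compute_period_cap_excess sol T P W cap)

-- ===== LEMMAS AND PROOFS =====

-- the stream of (team, period) appearance events of the played region, in loop order
def pvEvents (sol : List (List (Int × Int))) (P : Int) (W : Int) : List (Int × Int) :=
  (PySem.List.pyRange 0 P 1).flatMap (fun p =>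
    (PySem.List.pyRange 0 W 1).flatMap (fun w =>
      [((PySem.List.pyGetD (PySem.List.pyGetD sol p []) w ((0 : Int), (0 : Int))).1, p),
       ((PySem.List.pyGetD (PySem.List.pyGetD sol p []) w ((0 : Int), (0 : Int))).2, p)]))

-- B's per-event step
def pvStep (T cap : Int) (st : PySem.Dict (Int × Int) Int × Int) (k : Int × Int) :
    PySem.Dict (Int × Int) Int × Int :=
  if 1 ≤ k.1 ∧ k.1 ≤ T then
    (st.1.insert k (st.1.getD k 0 + 1), if cap < st.1.getD k 0 + 1 then st.2 + 1 else st.2)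
  else st

-- the in-range filter
def pvQ (T : Int) (k : Int × Int) : Bool := decide (1 ≤ k.1 ∧ k.1 ≤ T)

-- batch excess of an event list
def pvE (cap : Int) (l : List (Int × Int)) : Int :=
  ∑ k ∈ l.toFinset, (if cap < (l.count k : Int) then (l.count k : Int) - cap else 0)

lemma pv_events_bounds (sol : List (List (Int × Int))) (T P W cap : Int)
    (hpre : Pre_compute_period_cap_excess sol T P W cap) :
    ∀ k ∈ pvEvents sol P W, 0 ≤ k.1 ∧ k.1 ≤ T ∧ 0 ≤ k.2 ∧ k.2 < P := by
  obtain ⟨-, hP, hrows⟩ := hpre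
  intro k hk
  rw [pvEvents] at hk
  simp only [List.mem_flatMap, List.mem_cons, List.not_mem_nil, or_false,
    PySem.List.mem_pyRange_one] at hk
  obtain ⟨p, ⟨hp0, hpP⟩, w, ⟨hw0, hwW⟩, hmem⟩ := hk
  have hW : (0 : Int) < W := by omega
  have hplt : p.toNat < sol.length := by have := hP hW; omega
  have hrow_eq : PySem.List.pyGetD sol p [] = sol[p.toNat] := by
    rw [PySem.List.pyGetD_of_nonneg _ _ hp0, List.getD_eq_getElem _ _ hplt]
  have hrow_mem : sol[p.toNat] ∈ sol.take P.toNat := by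
    have hlt : p.toNat < (sol.take P.toNat).length := by
      simp only [List.length_take]; omega
    have := List.getElem_mem hlt
    rwa [List.getElem_take] at this
  obtain ⟨hWlen, hpairs⟩ := hrows _ hrow_mem
  have hwlt : w.toNat < (sol[p.toNat] : List (Int × Int)).length := by
    have := hWlen hW; omega
  have hhw_eq : PySem.List.pyGetD (PySem.List.pyGetD sol p []) w ((0 : Int), (0 : Int))
      = sol[p.toNat][w.toNat] := by
    rw [hrow_eq, PySem.List.pyGetD_of_nonneg _ _ hw0, List.getD_eq_getElem _ _ hwlt]
  have hhw_mem : sol[p.toNat][w.toNat] ∈ (sol[p.toNat] : List (Int × Int)).take W.toNat := by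
    have hlt : w.toNat < ((sol[p.toNat] : List (Int × Int)).take W.toNat).length := by
      simp only [List.length_take]; omega
    have := List.getElem_mem hlt
    rwa [List.getElem_take] at this
  have hb := hpairs _ hhw_mem
  rcases hmem with h | h
  · rw [h, hhw_eq]; exact ⟨hb.1, hb.2.1, hp0, hpP⟩
  · rw [h, hhw_eq]; exact ⟨hb.2.2.1, hb.2.2.2, hp0, hpP⟩

-- ---- A-side: the matrix fold counts occurrences ----

lemma pv_shape_pvBump (cnt : List (List Int)) (k : Int × Int) (n : Nat)
    (hk1 : 0 ≤ k.1) (hk3 : 0 ≤ k.2)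
    (hrow : ∀ r ∈ cnt, r.length = n) :
    (pvBump cnt k).length = cnt.length ∧ ∀ r ∈ pvBump cnt k, r.length = n := by
  unfold pvBump
  rw [PySem.List.pySetD_of_nonneg _ _ hk1, PySem.List.pySetD_of_nonneg _ _ hk3,
      PySem.List.pyGetD_of_nonneg _ _ hk1]
  refine ⟨by simp, ?_⟩
  by_cases hlt : k.1.toNat < cnt.length
  · intro r hr
    rcases List.mem_or_eq_of_mem_set hr with h | h
    · exact hrow r h
    · subst h
      rw [List.length_set, List.getD_eq_getElem cnt [] hlt]
      exact hrow _ (List.getElem_mem hlt)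
  · rw [List.set_eq_of_length_le (by omega)]
    exact hrow

lemma pvLook_pvBump (cnt : List (List Int)) (k : Int × Int) (T P t p : Int)
    (hlen : cnt.length = (T + 1).toNat) (hrow : ∀ r ∈ cnt, r.length = P.toNat)
    (hk : 0 ≤ k.1 ∧ k.1 ≤ T ∧ 0 ≤ k.2 ∧ k.2 < P)
    (ht : 0 ≤ t) (ht2 : t ≤ T) (hp : 0 ≤ p) (hp2 : p < P) :
    pvLook (pvBump cnt k) t p = pvLook cnt t p + (if (t, p) = k then 1 else 0) := by
  obtain ⟨hk1, hk2, hk3, hk4⟩ := hk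
  have hklt : k.1.toNat < cnt.length := by omega
  have htlt : t.toNat < cnt.length := by omega
  have hrklen : (cnt.getD k.1.toNat []).length = P.toNat := by
    rw [List.getD_eq_getElem cnt [] hklt]; exact hrow _ (List.getElem_mem hklt)
  unfold pvBump pvLook
  simp only [PySem.List.pySetD_of_nonneg _ _ hk1, PySem.List.pySetD_of_nonneg _ _ hk3,
      PySem.List.pyGetD_of_nonneg _ _ hk1, PySem.List.pyGetD_of_nonneg _ _ hk3,
      PySem.List.pyGetD_of_nonneg _ _ ht, PySem.List.pyGetD_of_nonneg _ _ hp]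
  simp only [List.getD_eq_getElem?_getD, List.getElem?_set]
  by_cases hteq : k.1.toNat = t.toNat
  · rw [if_pos hteq, if_pos hklt, Option.getD_some, List.getElem?_set]
    have hrl : (cnt[k.1.toNat]?.getD []).length = P.toNat := by
      rw [List.getElem?_eq_getElem hklt, Option.getD_some]
      rw [List.getD_eq_getElem cnt [] hklt] at hrklen
      exact hrklen
    by_cases hpeq : k.2.toNat = p.toNat
    · have hkey : (t, p) = k := by
        have h1 : t = k.1 := by omega
        have h2 : p = k.2 := by omega
        rw [h1, h2]
      rw [if_pos hpeq, if_pos (by omega), Option.getD_some, if_pos hkey, hteq, hpeq]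
    · have hkey : ¬ ((t, p) = k) := by
        intro h
        have : p = k.2 := by rw [← h]
        omega
      rw [if_neg hpeq, if_neg hkey, hteq]
      ring
  · have hkey : ¬ ((t, p) = k) := by
      intro h
      have : t = k.1 := by rw [← h]
      omega
    rw [if_neg hteq, if_neg hkey]
    ring

lemma pv_foldl_pvBump_count (ev : List (Int × Int)) (T P : Int) :
    ∀ (cnt : List (List Int)), cnt.length = (T + 1).toNat → (∀ r ∈ cnt, r.length = P.toNat) →
    (∀ k ∈ ev, 0 ≤ k.1 ∧ k.1 ≤ T ∧ 0 ≤ k.2 ∧ k.2 < P) →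
    ∀ t p, 0 ≤ t → t ≤ T → 0 ≤ p → p < P →
    pvLook (ev.foldl pvBump cnt) t p = pvLook cnt t p + (ev.count (t, p) : Int) := by
  induction ev with
  | nil => intro cnt _ _ _ t p _ _ _ _; simp
  | cons k ev ih =>
    intro cnt hlen hrow hev t p ht ht2 hp hp2
    have hk := hev k List.mem_cons_self
    have hshape := pv_shape_pvBump cnt k P.toNat hk.1 hk.2.2.1 hrow
    rw [List.foldl_cons,
        ih (pvBump cnt k) (hshape.1.trans hlen) hshape.2
          (fun k' hk' => hev k' (List.mem_cons_of_mem _ hk')) t p ht ht2 hp hp2,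
        pvLook_pvBump cnt k T P t p hlen hrow hk ht ht2 hp hp2,
        List.count_cons]
    by_cases h : (t, p) = k
    · simp only [h, beq_self_eq_true, if_true]
      push_cast
      ring
    · have hne : (k == (t, p)) = false := by
        simp only [beq_eq_false_iff_ne, ne_eq]
        intro hh; exact h hh.symm
      simp only [if_neg h, hne]
      push_cast
      ring

lemma pv_A_count (sol : List (List (Int × Int))) (T P W cap : Int)
    (hpre : Pre_compute_period_cap_excess sol T P W cap)
    (t p : Int) (ht : 0 ≤ t) (ht2 : t ≤ T) (hp : 0 ≤ p) (hp2 : p < P) :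
    pvLook ((pvEvents sol P W).foldl pvBump
      ((PySem.List.pyRange 0 (T + 1) 1).map (fun _ => List.replicate P.toNat (0 : Int)))) t p
      = ((pvEvents sol P W).count (t, p) : Int) := by
  have hcnt0 : (PySem.List.pyRange 0 (T + 1) 1).map (fun _ => List.replicate P.toNat (0 : Int))
      = List.replicate (T + 1).toNat (List.replicate P.toNat (0 : Int)) := by
    rw [List.map_const', PySem.List.length_pyRange_one]
    norm_num
  rw [hcnt0, pv_foldl_pvBump_count (pvEvents sol P W) T P _
      (by simp) (by intro r hr; rw [List.eq_of_mem_replicate hr]; simp)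
      (pv_events_bounds sol T P W cap hpre) t p ht ht2 hp hp2]
  have hlook0 : pvLook (List.replicate (T + 1).toNat (List.replicate P.toNat (0 : Int))) t p = 0 := by
    unfold pvLook
    rw [PySem.List.pyGetD_of_nonneg _ _ ht, PySem.List.pyGetD_of_nonneg _ _ hp]
    simp only [List.getD_eq_getElem?_getD, List.getElem?_replicate]
    rw [if_pos (by omega), Option.getD_some, List.getElem?_replicate,
        if_pos (by omega), Option.getD_some]
  rw [hlook0, zero_add]

lemma pv_A_loop_eq (sol : List (List (Int × Int))) (P W : Int) (cnt0 : List (List Int)) :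
    (PySem.List.pyRange 0 P 1).foldl (fun cnt p =>
      (PySem.List.pyRange 0 W 1).foldl (fun cnt w =>
        pvBump (pvBump cnt ((PySem.List.pyGetD (PySem.List.pyGetD sol p []) w ((0 : Int), (0 : Int))).1, p))
          ((PySem.List.pyGetD (PySem.List.pyGetD sol p []) w ((0 : Int), (0 : Int))).2, p)) cnt) cnt0
    = (pvEvents sol P W).foldl pvBump cnt0 := by
  rw [pvEvents, List.foldl_flatMap]
  congr 1
  funext cnt p
  rw [List.foldl_flatMap]
  rfl

lemma pv_foldl_if_sum {α : Type} (l : List α) (q : α → Prop) [DecidablePred q] (f : α → Int) (e : Int) :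
    l.foldl (fun e x => if q x then e + f x else e) e
      = e + (l.map fun x => if q x then f x else 0).sum := by
  have h : (fun (e : Int) x => if q x then e + f x else e)
      = fun e x => e + (if q x then f x else 0) := by
    funext e x; split_ifs <;> simp
  rw [h]
  exact PySem.List.foldl_add l (fun x => if q x then f x else 0) e

-- ---- B-side: the streaming fold computes (counter, batch excess) of the filtered stream ----

lemma pv_B_loop_eq (sol : List (List (Int × Int))) (T P W cap : Int)
    (st0 : PySem.Dict (Int × Int) Int × Int) :
    (PySem.List.pyRange 0 P 1).foldl (fun st p =>
      (PySem.List.pyRange 0 W 1).foldl (fun st w =>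
        let hw := PySem.List.pyGetD (PySem.List.pyGetD sol p []) w ((0 : Int), (0 : Int))
        [hw.1, hw.2].foldl (fun (st : PySem.Dict (Int × Int) Int × Int) t =>
          if 1 ≤ t ∧ t ≤ T then
            let c := st.1.getD (t, p) 0 + 1
            (st.1.insert (t, p) c, if cap < c then st.2 + 1 else st.2)
          else st) st) st) st0
    = (pvEvents sol P W).foldl (pvStep T cap) st0 := by
  rw [pvEvents, List.foldl_flatMap]
  congr 1
  funext st p
  rw [List.foldl_flatMap]
  rfl

lemma pvE_nil (cap : Int) : pvE cap [] = 0 := by simp [pvE]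

lemma pvE_append (cap : Int) (hcap : 0 ≤ cap) (l : List (Int × Int)) (k : Int × Int) :
    pvE cap (l ++ [k]) = pvE cap l + (if cap < (l.count k : Int) + 1 then 1 else 0) := by
  have hcount : ∀ x, (l ++ [k]).count x = l.count x + (if k = x then 1 else 0) := by
    intro x
    rw [List.count_append, List.count_singleton]
    by_cases h : k = x
    · subst h; simp
    · simp [h]
  have hfin : (l ++ [k]).toFinset = insert k l.toFinset := by
    rw [List.toFinset_append]
    simp [Finset.union_singleton]
  unfold pvE
  rw [hfin]
  by_cases hmem : k ∈ l.toFinset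
  · rw [Finset.insert_eq_self.mpr hmem]
    rw [← Finset.sum_erase_add _ _ hmem, ← Finset.sum_erase_add _ _ hmem]
    have hsame : ∀ x ∈ l.toFinset.erase k,
        (if cap < ((l ++ [k]).count x : Int) then ((l ++ [k]).count x : Int) - cap else 0)
          = (if cap < (l.count x : Int) then (l.count x : Int) - cap else 0) := by
      intro x hx
      have hne : k ≠ x := fun h => (Finset.mem_erase.mp hx).1 h.symm
      rw [hcount x, if_neg hne]
      simp
    rw [Finset.sum_congr rfl hsame]
    have hck : ((l ++ [k]).count k : Int) = (l.count k : Int) + 1 := by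
      rw [hcount k, if_pos rfl]; push_cast; ring
    rw [hck]
    split_ifs <;> omega
  · have hc0 : l.count k = 0 := by
      rw [List.count_eq_zero]
      exact fun h => hmem (List.mem_toFinset.mpr h)
    rw [Finset.sum_insert hmem]
    have hsame : ∀ x ∈ l.toFinset,
        (if cap < ((l ++ [k]).count x : Int) then ((l ++ [k]).count x : Int) - cap else 0)
          = (if cap < (l.count x : Int) then (l.count x : Int) - cap else 0) := by
      intro x hx
      have hne : k ≠ x := fun h => hmem (h ▸ hx)
      rw [hcount x, if_neg hne]
      simp
    rw [Finset.sum_congr rfl hsame]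
    have hck : ((l ++ [k]).count k : Int) = 1 := by
      rw [hcount k, if_pos rfl, hc0]
      norm_num
    rw [hck, hc0]
    push_cast
    split_ifs <;> omega

lemma pv_filter_append (T : Int) (l : List (Int × Int)) (k : Int × Int) :
    (l ++ [k]).filter (pvQ T) = l.filter (pvQ T) ++ (if pvQ T k then [k] else []) := by
  rw [List.filter_append]
  by_cases h : pvQ T k <;> simp [List.filter, h]

lemma pv_B_inv (T cap : Int) (hcap : 0 ≤ cap) (ev : List (Int × Int)) :
    ev.foldl (pvStep T cap) (PySem.Dict.empty, 0)
      = (PySem.Dict.counter (ev.filter (pvQ T)), pvE cap (ev.filter (pvQ T))) := by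
  induction ev using List.reverseRecOn with
  | nil => simp [PySem.Dict.counter, pvE_nil]
  | append_singleton l k ih =>
    rw [List.foldl_append, List.foldl_cons, List.foldl_nil, ih, pv_filter_append]
    by_cases hq : pvQ T k
    · have hq' : 1 ≤ k.1 ∧ k.1 ≤ T := by simpa [pvQ] using hq
      rw [if_pos hq]
      unfold pvStep
      rw [if_pos hq']
      set l' := l.filter (pvQ T) with hl'
      have hgd : (PySem.Dict.counter l').getD k 0 = (l'.count k : Int) :=
        PySem.Dict.getD_counter l' k
      have hctr : PySem.Dict.counter (l' ++ [k])
          = (PySem.Dict.counter l').insert k ((PySem.Dict.counter l').getD k 0 + 1) := by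
        rw [← PySem.Dict.foldl_insert_getD_add_one_eq_counter,
            ← PySem.Dict.foldl_insert_getD_add_one_eq_counter, List.foldl_append,
            List.foldl_cons, List.foldl_nil]
      rw [hctr, pvE_append cap hcap l' k, hgd]
      refine Prod.ext rfl ?_
      simp only []
      split_ifs <;> omega
    · rw [if_neg hq]
      unfold pvStep
      have hq' : ¬ (1 ≤ k.1 ∧ k.1 ≤ T) := by simpa [pvQ] using hq
      rw [if_neg hq', List.append_nil]

lemma pv_B_no_q (T cap : Int) (ev : List (Int × Int)) (h : ∀ k ∈ ev, ¬ (1 ≤ k.1 ∧ k.1 ≤ T)) :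
    ∀ st, ev.foldl (pvStep T cap) st = st := by
  induction ev with
  | nil => intro st; rfl
  | cons k ev ih =>
    intro st
    rw [List.foldl_cons]
    have : pvStep T cap st k = st := by
      unfold pvStep
      rw [if_neg (h k List.mem_cons_self)]
    rw [this]
    exact ih (fun k' hk' => h k' (List.mem_cons_of_mem _ hk')) st

lemma pv_foldl_id (l : List Int) (e : Int) : l.foldl (fun e (_ : Int) => e) e = e := by
  induction l generalizing e with
  | nil => rfl
  | cons x l ih => exact ih e

lemma pv_range_nil (a b : Int) (h : b ≤ a) : PySem.List.pyRange a b 1 = [] := by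
  have := PySem.List.length_pyRange_one a b
  apply List.eq_nil_of_length_eq_zero
  omega

-- ---- bridging the A-side grid sum to the B-side batch excess ----

lemma pv_final_sum (sol : List (List (Int × Int))) (T P W cap : Int)
    (hpre : Pre_compute_period_cap_excess sol T P W cap) (hcap : 0 ≤ cap) :
    ((PySem.List.pyRange 1 (T + 1) 1).map (fun t =>
      ((PySem.List.pyRange 0 P 1).map (fun p =>
        if cap < ((pvEvents sol P W).count (t, p) : Int)
        then ((pvEvents sol P W).count (t, p) : Int) - cap else 0)).sum)).sum
    = pvE cap ((pvEvents sol P W).filter (pvQ T)) := by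
  set ev := pvEvents sol P W with hev
  set G : Int × Int → Int := fun k =>
    if cap < (ev.count k : Int) then (ev.count k : Int) - cap else 0 with hG
  rw [← List.sum_toFinset _ (PySem.List.nodup_pyRange_one 1 (T + 1))]
  calc (PySem.List.pyRange 1 (T + 1) 1).toFinset.sum
          (fun t => ((PySem.List.pyRange 0 P 1).map (fun p => G (t, p))).sum)
      = (PySem.List.pyRange 1 (T + 1) 1).toFinset.sum
          (fun t => (PySem.List.pyRange 0 P 1).toFinset.sum (fun p => G (t, p))) := by
        refine Finset.sum_congr rfl (fun t _ => ?_)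
        rw [List.sum_toFinset _ (PySem.List.nodup_pyRange_one 0 P)]
    _ = ((PySem.List.pyRange 1 (T + 1) 1).toFinset ×ˢ (PySem.List.pyRange 0 P 1).toFinset).sum G := by
        rw [Finset.sum_product]
    _ = ((ev.filter (pvQ T)).toFinset).sum G := by
        set s := (PySem.List.pyRange 1 (T + 1) 1).toFinset ×ˢ (PySem.List.pyRange 0 P 1).toFinset with hs
        have hmem_s : ∀ x : Int × Int, x ∈ s ↔ (1 ≤ x.1 ∧ x.1 < T + 1) ∧ (0 ≤ x.2 ∧ x.2 < P) := by
          intro x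
          simp [hs, Finset.mem_product, List.mem_toFinset, PySem.List.mem_pyRange_one]
        have hsub : (ev.filter (pvQ T)).toFinset ⊆ s := by
          intro x hx
          have hx' := List.mem_toFinset.mp hx
          have hq : 1 ≤ x.1 ∧ x.1 ≤ T := by
            have := List.of_mem_filter hx'
            simpa [pvQ] using this
          have hb := pv_events_bounds sol T P W cap hpre x (List.mem_of_mem_filter hx')
          exact (hmem_s x).mpr ⟨⟨hq.1, by omega⟩, ⟨hb.2.2.1, hb.2.2.2⟩⟩
        refine (Finset.sum_subset hsub ?_).symm
        intro x hxs hxn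
        have hq : pvQ T x = true := by
          have := (hmem_s x).mp hxs
          simp only [pvQ, decide_eq_true_eq]
          omega
        have hxev : x ∉ ev := by
          intro h
          exact hxn (List.mem_toFinset.mpr (List.mem_filter.mpr ⟨h, hq⟩))
        have hcnt : ev.count x = 0 := List.count_eq_zero.mpr hxev
        rw [if_neg (by rw [hcnt]; push_cast; omega)]
    _ = pvE cap (ev.filter (pvQ T)) := by
        unfold pvE
        refine Finset.sum_congr rfl (fun k hk => ?_)
        have hq : pvQ T k = true := List.of_mem_filter (List.mem_toFinset.mp hk)
        rw [List.count_filter hq]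

-- ===== VERDICT (by name: the statement is the Claim_ definition above) =====
theorem compute_period_cap_excess_spec : Claim_equal_compute_period_cap_excess := by
  intro sol T P W cap hdom hpre
  unfold Spec_compute_period_cap_excess
  unfold compute_period_cap_excess compute_period_cap_excess_alt
  simp only []
  rw [pv_A_loop_eq, pv_B_loop_eq]
  set ev := pvEvents sol P W with hevdef
  by_cases hTP : 0 < T ∧ 0 < P
  · -- main case: cap ≥ 0 by Pre_
    have hcap : 0 ≤ cap := hpre.1 hTP
    set CNT := ev.foldl pvBump
        ((PySem.List.pyRange 0 (T + 1) 1).map (fun _ => List.replicate P.toNat (0 : Int))) with hCNT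
    -- B side: the streaming invariant
    rw [pv_B_inv T cap hcap ev]
    simp only []
    -- A side: folds to sums
    have hinner : ∀ (t e : Int),
        (PySem.List.pyRange 0 P 1).foldl (fun e p =>
          if cap < pvLook CNT t p then e + (pvLook CNT t p - cap) else e) e
        = e + ((PySem.List.pyRange 0 P 1).map (fun p =>
            if cap < pvLook CNT t p then pvLook CNT t p - cap else 0)).sum := by
      intro t e
      exact pv_foldl_if_sum (PySem.List.pyRange 0 P 1) (fun p => cap < pvLook CNT t p)
        (fun p => pvLook CNT t p - cap) e
    rw [show (fun (excess : Int) (t : Int) =>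
          (PySem.List.pyRange 0 P 1).foldl (fun excess p =>
            if cap < pvLook CNT t p then excess + (pvLook CNT t p - cap) else excess) excess)
        = fun (excess : Int) (t : Int) => excess + ((PySem.List.pyRange 0 P 1).map (fun p =>
            if cap < pvLook CNT t p then pvLook CNT t p - cap else 0)).sum from
      funext fun e => funext fun t => hinner t e]
    rw [PySem.List.foldl_add, zero_add]
    have hA : ((PySem.List.pyRange 1 (T + 1) 1).map (fun t =>
          ((PySem.List.pyRange 0 P 1).map (fun p =>
            if cap < pvLook CNT t p then pvLook CNT t p - cap else 0)).sum)).sum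
        = ((PySem.List.pyRange 1 (T + 1) 1).map (fun t =>
          ((PySem.List.pyRange 0 P 1).map (fun p =>
            if cap < ((ev.count (t, p) : Nat) : Int)
            then ((ev.count (t, p) : Nat) : Int) - cap else 0)).sum)).sum := by
      congr 1
      refine List.map_congr_left (fun t htm => ?_)
      congr 1
      refine List.map_congr_left (fun p hpm => ?_)
      rw [PySem.List.mem_pyRange_one] at htm hpm
      rw [hCNT, pv_A_count sol T P W cap hpre t p (by omega) (by omega) (by omega) (by omega)]
    rw [hA, pv_final_sum sol T P W cap hpre hcap]
  · -- degenerate cases: both sides are 0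
    rcases not_and_or.mp hTP with hT | hP
    · -- T ≤ 0: A's excess loop range is empty; B's filter never fires
      have hT0 : T + 1 ≤ 1 := by omega
      rw [pv_range_nil 1 (T + 1) hT0, List.foldl_nil]
      have hno : ∀ k ∈ ev, ¬ (1 ≤ k.1 ∧ k.1 ≤ T) := by
        intro k hk
        have hb := pv_events_bounds sol T P W cap hpre k hk
        omega
      rw [pv_B_no_q T cap ev hno]
    · -- P ≤ 0: the event stream and the inner period loop are empty
      have hP0 : P ≤ 0 := by omega
      have hev0 : ev = [] := by
        rw [hevdef, pvEvents, pv_range_nil 0 P hP0]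
        rfl
      rw [hev0, List.foldl_nil]
      rw [pv_range_nil 0 P hP0]
      simp only [List.foldl_nil]
      rw [pv_foldl_id]
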